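-- pv_equiv track=rewrite | github.com/PrincetonUniversity/introgression | code/misc/seq_functions.py | index_ignoring_gaps
-- ===== SOURCE A (Python) =====
-- def index_ignoring_gaps(s, i, s_start, gap_symbol):
--     '''returns the index of the ith (starting at 0) non-gap character in
--     s, given that the start index of s is s_start (instead of needing
--     to be 0); for example, s='-A-AA-A', i=2, s_start=0 => returns 4
--     '''
--
--     assert s_start >= 0
--
--     x = 0
--     non_gap_count = 0
--     i -= s_start
--     if i < 0:
--         return -1
--     while x < len(s):
--         if s[x] != gap_symbol and non_gap_count >= i:
--             return x
--         if s[x] != gap_symbol: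
--             non_gap_count += 1
--         x += 1
--     return x
-- ===== SOURCE B (Python) =====
-- def index_ignoring_gaps(s, i, s_start, gap_symbol):
--     assert s_start >= 0
--     i -= s_start
--     if i < 0:
--         return -1
--     positions = [x for x, c in enumerate(s) if c != gap_symbol]
--     return positions[i] if i < len(positions) else len(s)
-- ===== Notes on version B (the rewrite author's own statement) =====
-- stated objective: simpler
-- what changed: B replaces A's counter-driven early-exit while loop by building the position table of all non-gap characters once and returning the ith entry (len(s) if there is no such entry).
import Mathlib
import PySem

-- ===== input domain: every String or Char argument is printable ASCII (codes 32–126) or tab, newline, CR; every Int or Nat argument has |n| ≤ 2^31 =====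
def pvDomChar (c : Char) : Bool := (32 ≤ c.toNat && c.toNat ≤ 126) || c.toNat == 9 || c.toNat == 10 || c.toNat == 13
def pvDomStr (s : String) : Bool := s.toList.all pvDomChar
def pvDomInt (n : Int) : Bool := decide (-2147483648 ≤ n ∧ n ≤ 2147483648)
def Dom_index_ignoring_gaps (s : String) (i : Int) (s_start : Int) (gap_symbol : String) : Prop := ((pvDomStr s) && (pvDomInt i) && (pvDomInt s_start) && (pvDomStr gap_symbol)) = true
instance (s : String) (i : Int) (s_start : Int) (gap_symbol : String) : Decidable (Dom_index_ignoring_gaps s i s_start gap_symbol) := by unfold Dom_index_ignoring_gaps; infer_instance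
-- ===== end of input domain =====

-- B builds the table of non-gap positions once and indexes it, instead of A's counter-driven early-exit scan (return value equivalence, proved below).


-- ===== PORT A =====
-- Python's `s[x] != gap_symbol`: the one-char string at position x compared with gap_symbol
-- (String equality expressed char-list-wise; exact for all strings).
def pvNeGap (gap_symbol : String) (c : Char) : Bool := gap_symbol.toList != [c]

-- the while loop of A: remaining characters, current x, current non_gap_count, target i
def pvALoop (gap_symbol : String) : List Char → Int → Int → Int → Int
  | [], x, _, _ => x
  | c :: rest, x, non_gap_count, i =>
    if pvNeGap gap_symbol c ∧ non_gap_count ≥ i then x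
    else pvALoop gap_symbol rest (x + 1)
      (if pvNeGap gap_symbol c then non_gap_count + 1 else non_gap_count) i

def index_ignoring_gaps (s : String) (i : Int) (s_start : Int) (gap_symbol : String) : Int :=
  -- assert s_start >= 0 is Pre_ below
  let i := i - s_start
  if i < 0 then -1
  else pvALoop gap_symbol s.toList 0 0 i

-- ===== PORT B =====
-- `[x for x, c in enumerate(s) if c != gap_symbol]`
def pvPositions (gap_symbol : String) (cs : List Char) (start : Int) : List Int :=
  ((PySem.List.enumerate cs start).filter (fun p => pvNeGap gap_symbol p.2)).map (·.1)

def index_ignoring_gaps_alt (s : String) (i : Int) (s_start : Int) (gap_symbol : String) : Int :=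
  -- assert s_start >= 0 is Pre_ below
  let i := i - s_start
  if i < 0 then -1
  else
    let positions := pvPositions gap_symbol s.toList 0
    if i < (positions.length : Int) then (PySem.List.pyGet? positions i).getD 0  -- in-bounds index
    else (s.toList.length : Int)

-- ===== PRECONDITION & SPEC =====
-- Pre_ excludes exactly the inputs on which A's `assert s_start >= 0` raises AssertionError.
def Pre_index_ignoring_gaps (s : String) (i : Int) (s_start : Int) (gap_symbol : String) : Prop := 0 ≤ s_start
instance (s : String) (i : Int) (s_start : Int) (gap_symbol : String) : Decidable (Pre_index_ignoring_gaps s i s_start gap_symbol) := by unfold Pre_index_ignoring_gaps; infer_instance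

def pvWitness_index_ignoring_gaps : String × Int × Int × String := ("-A-AA-A", 2, 0, "-")

def Spec_index_ignoring_gaps (s : String) (i : Int) (s_start : Int) (gap_symbol : String) (out : Int) : Prop := out = index_ignoring_gaps_alt s i s_start gap_symbol
instance (s : String) (i : Int) (s_start : Int) (gap_symbol : String) (out : Int) : Decidable (Spec_index_ignoring_gaps s i s_start gap_symbol out) := by unfold Spec_index_ignoring_gaps; infer_instance

-- ===== CLAIM (what is proved, stated in full; the proofs are below) =====
def Claim_equal_index_ignoring_gaps : Prop := ∀ (s : String) (i : Int) (s_start : Int) (gap_symbol : String), Dom_index_ignoring_gaps s i s_start gap_symbol → Pre_index_ignoring_gaps s i s_start gap_symbol → Spec_index_ignoring_gaps s i s_start gap_symbol (index_ignoring_gaps s i s_start gap_symbol)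

-- ===== LEMMAS AND PROOFS =====

-- total lookup used only by the proofs: jth element of l (j counted from 0), default d
def pvGetOr : List Int → Int → Int → Int
  | [], _, d => d
  | a :: l, j, d => if j = 0 then a else pvGetOr l (j - 1) d

theorem pvGetOr_cons (a : Int) (l : List Int) (j d : Int) :
    pvGetOr (a :: l) j d = if j = 0 then a else pvGetOr l (j - 1) d := rfl

theorem pvPositions_nil (gap : String) (x : Int) : pvPositions gap [] x = [] := rfl

theorem pvPositions_cons (gap : String) (c : Char) (rest : List Char) (x : Int) :
    pvPositions gap (c :: rest) x =
      if pvNeGap gap c then x :: pvPositions gap rest (x + 1) else pvPositions gap rest (x + 1) := by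
  simp only [pvPositions, PySem.List.enumerate_cons, List.filter_cons]
  by_cases h : pvNeGap gap c <;> simp [h]

-- A's loop equals lookup in B's position table
theorem pvALoop_eq (gap : String) (cs : List Char) :
    ∀ (x ngc i : Int), ngc ≤ i →
      pvALoop gap cs x ngc i = pvGetOr (pvPositions gap cs x) (i - ngc) (x + cs.length) := by
  induction cs with
  | nil => intro x ngc i _; simp [pvALoop, pvPositions_nil, pvGetOr]
  | cons c rest ih =>
    intro x ngc i hle
    rw [pvALoop, pvPositions_cons]
    have elen : (x + 1) + (rest.length : Int) = x + ((c :: rest).length : Int) := by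
      simp only [List.length_cons]; push_cast; ring
    by_cases hne : pvNeGap gap c
    · rw [if_pos hne]
      by_cases hge : ngc ≥ i
      · have h0 : i - ngc = 0 := by omega
        rw [if_pos ⟨hne, hge⟩, if_pos hne, pvGetOr_cons, if_pos h0]
      · have h1 : i - ngc ≠ 0 := by omega
        rw [if_neg (fun h => hge h.2), if_pos hne, pvGetOr_cons, if_neg h1,
            ih (x + 1) (ngc + 1) i (by omega)]
        have e1 : i - (ngc + 1) = i - ngc - 1 := by ring
        rw [e1, elen]
    · rw [if_neg (fun h => hne h.1), if_neg hne, if_neg hne,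
          ih (x + 1) ngc i hle, elen]

theorem pvGetOr_eq (l : List Int) : ∀ (j d : Int), 0 ≤ j →
    pvGetOr l j d = if j < (l.length : Int) then (PySem.List.pyGet? l j).getD 0 else d := by
  induction l with
  | nil => intro j d hj; simp [pvGetOr]; omega
  | cons a l ih =>
    intro j d hj
    by_cases h0 : j = 0
    · subst h0
      rw [pvGetOr_cons, if_pos rfl, if_pos (by simp only [List.length_cons]; push_cast; omega)]
      simp
    · have h1 : 0 ≤ j - 1 := by omega
      rw [pvGetOr_cons, if_neg h0, ih (j - 1) d h1]
      have hg : PySem.List.pyGet? (a :: l) j = PySem.List.pyGet? l (j - 1) := by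
        rw [PySem.List.pyGet?_of_nonneg _ hj, PySem.List.pyGet?_of_nonneg _ h1]
        have h2 : j.toNat = (j - 1).toNat + 1 := by omega
        rw [h2]; simp
      rw [hg]
      by_cases hlt : j - 1 < (l.length : Int)
      · rw [if_pos hlt, if_pos (by simp only [List.length_cons]; push_cast; omega)]
      · rw [if_neg hlt, if_neg (by simp only [List.length_cons]; push_cast; omega)]

-- ===== VERDICT (by name: the statement is the Claim_ definition above) =====
theorem index_ignoring_gaps_spec : Claim_equal_index_ignoring_gaps := by
  intro s i s_start gap _ _
  unfold Spec_index_ignoring_gaps index_ignoring_gaps index_ignoring_gaps_alt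
  by_cases h : i - s_start < 0
  · simp [h]
  · simp only [h, if_false]
    rw [pvALoop_eq gap s.toList 0 0 (i - s_start) (by omega),
        pvGetOr_eq _ (i - s_start - 0) _ (by omega)]
    norm_num
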